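-- pv_equiv track=rewrite | github.com/METAMARGINAL/Stradan_crib2 | combinator/jhonson-trotter.py | find_max_mobile_element
-- ===== SOURCE A (Python) =====
-- def find_max_mobile_element(permutation, direction):
--     index = -1
--     for i in range(len(permutation)):
--         next_element_index = i + direction[i]
--
--         if 0 <= next_element_index < len(permutation):
--             if permutation[i] > permutation[next_element_index]:
--                 if index == -1 or permutation[i] > permutation[index]:
--                     index = i
--     return index
-- ===== SOURCE B (Python) =====
-- def find_max_mobile_element(permutation, direction):
--     n = len(permutation)
--     for i in sorted(range(n), key=lambda i: permutation[i], reverse=True):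
--         j = i + direction[i]
--         if 0 <= j < n and permutation[i] > permutation[j]:
--             return i
--     return -1
-- ===== Notes on version B (the rewrite author's own statement) =====
-- stated objective: alternative
-- what changed: B stably sorts the indices by their value in descending order and returns the first mobile index it meets (stability makes ties resolve to the lowest index, matching A's strict-greater running best), replacing A's single-pass running-best scan by a sort-then-first-hit search.
import Mathlib
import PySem

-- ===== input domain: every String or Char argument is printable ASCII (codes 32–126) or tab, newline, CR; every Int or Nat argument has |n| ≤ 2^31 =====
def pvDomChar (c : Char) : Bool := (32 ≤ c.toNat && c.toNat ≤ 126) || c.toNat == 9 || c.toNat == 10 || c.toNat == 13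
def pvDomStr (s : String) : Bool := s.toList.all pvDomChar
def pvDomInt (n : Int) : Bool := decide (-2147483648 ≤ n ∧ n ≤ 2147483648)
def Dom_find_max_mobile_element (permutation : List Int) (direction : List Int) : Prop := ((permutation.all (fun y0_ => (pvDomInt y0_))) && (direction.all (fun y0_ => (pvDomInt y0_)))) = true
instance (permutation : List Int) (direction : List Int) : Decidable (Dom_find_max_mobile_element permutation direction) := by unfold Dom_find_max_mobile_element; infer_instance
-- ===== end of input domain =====

-- B replaces A's single-pass running-best scan by a sort-then-first-hit search: stably sort the
-- indices by value descending, return the first mobile one (same result; not claimed faster).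


-- ===== PORT A =====
def find_max_mobile_element (permutation : List Int) (direction : List Int) : Int :=
  (PySem.List.pyRange 0 permutation.length 1).foldl
    (fun index i =>
      let next_element_index := i + PySem.List.pyGetD direction i 0
      if 0 ≤ next_element_index ∧ next_element_index < (permutation.length : Int) then
        if PySem.List.pyGetD permutation next_element_index 0 < PySem.List.pyGetD permutation i 0 then
          if index = -1 ∨ PySem.List.pyGetD permutation index 0 < PySem.List.pyGetD permutation i 0 then i
          else index
        else index
      else index)
    (-1)

-- ===== PORT B =====
-- the 'for i in …: if mobile: return i / return -1' loop of Source B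
def pvFirstMobile (permutation direction : List Int) (n : Int) : List Int → Int
  | [] => -1
  | i :: rest =>
    if 0 ≤ i + PySem.List.pyGetD direction i 0 ∧ i + PySem.List.pyGetD direction i 0 < n ∧
        PySem.List.pyGetD permutation (i + PySem.List.pyGetD direction i 0) 0 < PySem.List.pyGetD permutation i 0
    then i
    else pvFirstMobile permutation direction n rest

def find_max_mobile_element_alt (permutation : List Int) (direction : List Int) : Int :=
  let n : Int := permutation.length
  pvFirstMobile permutation direction n
    (PySem.List.sorted (PySem.List.pyRange 0 n 1) (fun i => PySem.List.pyGetD permutation i 0) true)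

-- ===== PRECONDITION & SPEC =====
-- A (and B alike) raises IndexError reading direction[i] when direction is shorter than permutation.
def Pre_find_max_mobile_element (permutation : List Int) (direction : List Int) : Prop :=
  permutation.length ≤ direction.length
instance (permutation : List Int) (direction : List Int) : Decidable (Pre_find_max_mobile_element permutation direction) := by unfold Pre_find_max_mobile_element; infer_instance
def pvWitness_find_max_mobile_element : List Int × List Int := ([1, 0], [1, -1])

def Spec_find_max_mobile_element (permutation : List Int) (direction : List Int) (out : Int) : Prop := out = find_max_mobile_element_alt permutation direction
instance (permutation : List Int) (direction : List Int) (out : Int) : Decidable (Spec_find_max_mobile_element permutation direction out) := by unfold Spec_find_max_mobile_element; infer_instance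

-- ===== CLAIM (what is proved, stated in full; the proofs are below) =====
def Claim_equal_find_max_mobile_element : Prop := ∀ (permutation : List Int) (direction : List Int), Dom_find_max_mobile_element permutation direction → Pre_find_max_mobile_element permutation direction → Spec_find_max_mobile_element permutation direction (find_max_mobile_element permutation direction)

-- ===== LEMMAS AND PROOFS =====

-- Running-best fold with sentinel -1 over nonnegative indices equals max?'s Option fold.
lemma fold_argmax_eq (key : Int → Int) :
    ∀ (l : List Int) (acc : Option Int), (∀ i ∈ l, 0 ≤ i) → (∀ m, acc = some m → 0 ≤ m) →
    l.foldl (fun idx i => if idx = -1 ∨ key idx < key i then i else idx)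
        (match acc with | none => -1 | some m => m)
      = (match l.foldl
            (fun a x => match a with
              | none => some x
              | some m => if key m < key x then some x else some m) acc with
          | none => (-1 : Int) | some m => m) := by
  intro l
  induction l with
  | nil => intro acc _ _; cases acc <;> rfl
  | cons i t ih =>
    intro acc hnn hacc
    have hi : 0 ≤ i := hnn i (List.mem_cons_self ..)
    have hnn' : ∀ j ∈ t, 0 ≤ j := fun j hj => hnn j (List.mem_cons_of_mem _ hj)
    cases acc with
    | none =>
      have h := ih (some i) hnn' (by intro m' hm'; cases hm'; exact hi)
      simpa using h
    | some m =>
      have hm : 0 ≤ m := hacc m rfl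
      have hne : ¬ (m = -1) := by omega
      by_cases hk : key m < key i
      · have h := ih (some i) hnn' (by intro m' hm'; cases hm'; exact hi)
        simpa [hk] using h
      · have h := ih (some m) hnn' (by intro m' hm'; cases hm'; exact hm)
        simpa [hk, hne] using h

-- B's early-return loop is head-of-filter with default -1.
lemma firstMobile_eq_head_filter (p d : List Int) (n : Int) (s : List Int) :
    pvFirstMobile p d n s
      = (match (s.filter (fun i => decide (0 ≤ i + PySem.List.pyGetD d i 0 ∧
            i + PySem.List.pyGetD d i 0 < n ∧
            PySem.List.pyGetD p (i + PySem.List.pyGetD d i 0) 0 < PySem.List.pyGetD p i 0))).head? with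
          | none => (-1 : Int) | some m => m) := by
  induction s with
  | nil => rfl
  | cons i t ih =>
    by_cases h : 0 ≤ i + PySem.List.pyGetD d i 0 ∧ i + PySem.List.pyGetD d i 0 < n ∧
        PySem.List.pyGetD p (i + PySem.List.pyGetD d i 0) 0 < PySem.List.pyGetD p i 0
    · simp [pvFirstMobile, h]
    · simp [pvFirstMobile, h, ih]

-- insertBy (descending) puts x in front when everything is strictly smaller.
lemma insertBy_cons_of_lt (key : Int → Int) (x : Int) (t : List Int)
    (h : ∀ z ∈ t, key z < key x) :
    PySem.List.insertBy (fun a b => decide (key b < key a)) x t = x :: t := by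
  cases t with
  | nil => rfl
  | cons y ys => simp [PySem.List.insertBy, h y (List.mem_cons_self ..)]

-- Stability of descending insertion: filtering commutes with one insertion step.
lemma filter_insertBy (key : Int → Int) (C : Int → Bool) (x : Int) :
    ∀ (s : List Int), s.Pairwise (fun a b => key b ≤ key a) →
    (PySem.List.insertBy (fun a b => decide (key b < key a)) x s).filter C
      = if C x then PySem.List.insertBy (fun a b => decide (key b < key a)) x (s.filter C)
        else s.filter C := by
  intro s
  induction s with
  | nil => intro _; by_cases hx : C x <;> simp [PySem.List.insertBy, hx]
  | cons y ys ih =>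
    intro hp
    have hdesc : ∀ z ∈ ys, key z ≤ key y := (List.pairwise_cons.1 hp).1
    have hp' : ys.Pairwise (fun a b => key b ≤ key a) := (List.pairwise_cons.1 hp).2
    by_cases hb : key y < key x
    · -- x goes in front of y :: ys
      have hall : ∀ z ∈ (y :: ys).filter C, key z < key x := by
        intro z hz
        have hz' := List.mem_of_mem_filter hz
        rcases List.mem_cons.1 hz' with rfl | hz''
        · exact hb
        · exact lt_of_le_of_lt (hdesc z hz'') hb
      by_cases hx : C x
      · simp only [PySem.List.insertBy, hb, decide_true, if_pos, hx]
        rw [insertBy_cons_of_lt key x _ hall]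
        simp [hx]
      · simp only [PySem.List.insertBy, hb, decide_true, if_pos, hx]
        simp [hx]
    · -- x goes after y
      have hstep : PySem.List.insertBy (fun a b => decide (key b < key a)) x (y :: ys)
          = y :: PySem.List.insertBy (fun a b => decide (key b < key a)) x ys := by
        simp [PySem.List.insertBy, hb]
      rw [hstep]
      by_cases hy : C y
      · by_cases hx : C x
        · have hstep2 : PySem.List.insertBy (fun a b => decide (key b < key a)) x (y :: ys.filter C)
              = y :: PySem.List.insertBy (fun a b => decide (key b < key a)) x (ys.filter C) := by
            simp [PySem.List.insertBy, hb]
          simp only [List.filter_cons, hy, if_pos, ih hp', hx]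
          simp [hstep2]
        · simp only [List.filter_cons, hy, if_pos, ih hp', hx]
          simp
      · by_cases hx : C x
        · simp only [List.filter_cons, hy, ih hp', hx]
          simp
        · simp only [List.filter_cons, hy, ih hp', hx]
          simp

-- Filtering commutes with the whole stable descending sort.
lemma filter_sorted (key : Int → Int) (C : Int → Bool) :
    ∀ (l : List Int),
    (PySem.List.sorted l key true).filter C = PySem.List.sorted (l.filter C) key true := by
  intro l
  induction l using List.reverseRecOn with
  | nil => rfl
  | append_singleton l x ih =>
    have hs1 : PySem.List.sorted (l ++ [x]) key true
        = PySem.List.insertBy (fun a b => decide (key b < key a)) x (PySem.List.sorted l key true) := by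
      rw [PySem.List.sorted_rev_eq_foldl_insertBy, PySem.List.sorted_rev_eq_foldl_insertBy,
        List.foldl_append]
      rfl
    have hdesc := PySem.List.sorted_pairwise_rev (xs := l) (key := key)
    rw [hs1, filter_insertBy key C x _ hdesc, List.filter_append, ih]
    by_cases hx : C x
    · have h2 : PySem.List.sorted (l.filter C ++ [x]) key true
          = PySem.List.insertBy (fun a b => decide (key b < key a)) x (PySem.List.sorted (l.filter C) key true) := by
        rw [PySem.List.sorted_rev_eq_foldl_insertBy, PySem.List.sorted_rev_eq_foldl_insertBy,
          List.foldl_append]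
        rfl
      simp [hx, h2]
    · simp [hx]

-- max? written as its defining fold (aligns the matcher constants of the two sides).
lemma max?_eq_foldl (key : Int → Int) (c : List Int) :
    PySem.List.max? c key
      = c.foldl (fun a x => match a with
          | none => some x
          | some m => if key m < key x then some x else some m) none := by
  unfold PySem.List.max?
  congr 1
  funext a x
  cases a <;> rfl

-- The head of the stable descending sort is exactly max? (first extremal element).
lemma head_sorted_eq_max? (key : Int → Int) (c : List Int) :
    (PySem.List.sorted c key true).head? = PySem.List.max? c key := by
  have haux : ∀ (c : List Int) (acc : List Int),
      (c.foldl (fun a x => PySem.List.insertBy (fun a b => decide (key b < key a)) x a) acc).head?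
        = c.foldl (fun a x => match a with
            | none => some x
            | some m => if key m < key x then some x else some m) acc.head? := by
    intro c
    induction c with
    | nil => intro acc; rfl
    | cons x t ih =>
      intro acc
      rw [List.foldl_cons, List.foldl_cons, ih]
      congr 1
      cases acc with
      | nil => rfl
      | cons h hs =>
        by_cases hb : key h < key x <;> simp [PySem.List.insertBy, hb]
  rw [PySem.List.sorted_rev_eq_foldl_insertBy, max?_eq_foldl]
  exact haux c []

-- ===== VERDICT (by name: the statement is the Claim_ definition above) =====
theorem find_max_mobile_element_spec : Claim_equal_find_max_mobile_element := by
  intro p d _ _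
  unfold Spec_find_max_mobile_element find_max_mobile_element find_max_mobile_element_alt
  set key : Int → Int := fun i => PySem.List.pyGetD p i 0 with hkey
  set C : Int → Bool := fun i =>
    decide (0 ≤ i + PySem.List.pyGetD d i 0 ∧ i + PySem.List.pyGetD d i 0 < (p.length : Int) ∧
      PySem.List.pyGetD p (i + PySem.List.pyGetD d i 0) 0 < PySem.List.pyGetD p i 0) with hC
  -- A's loop body as a filtered running-best step
  have hstep :
      (fun (index : Int) (i : Int) =>
        let next_element_index := i + PySem.List.pyGetD d i 0
        if 0 ≤ next_element_index ∧ next_element_index < (p.length : Int) then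
          if PySem.List.pyGetD p next_element_index 0 < PySem.List.pyGetD p i 0 then
            if index = -1 ∨ PySem.List.pyGetD p index 0 < PySem.List.pyGetD p i 0 then i
            else index
          else index
        else index)
      = fun (index : Int) (i : Int) =>
          if C i = true then (if index = -1 ∨ key index < key i then i else index) else index := by
    funext index i
    simp only [hC, hkey]
    by_cases h1 : 0 ≤ i + PySem.List.pyGetD d i 0 ∧ i + PySem.List.pyGetD d i 0 < (p.length : Int) <;>
      by_cases h2 : PySem.List.pyGetD p (i + PySem.List.pyGetD d i 0) 0 < PySem.List.pyGetD p i 0 <;>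
        simp [h1, h2]
  rw [hstep, PySem.List.foldl_if_eq_foldl_filter]
  have hnn : ∀ i ∈ (PySem.List.pyRange 0 (p.length : Int) 1).filter C, 0 ≤ i := by
    intro i hmem
    have := List.mem_of_mem_filter hmem
    exact ((PySem.List.mem_pyRange_one).1 this).1
  have hA := fold_argmax_eq key ((PySem.List.pyRange 0 (p.length : Int) 1).filter C) none hnn
    (by intro m h; cases h)
  -- B's loop is head-of-filter of the sort = max? of the filtered range
  have hB := firstMobile_eq_head_filter p d (p.length : Int)
    (PySem.List.sorted (PySem.List.pyRange 0 (p.length : Int) 1) key true)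
  rw [hB, ← hC, filter_sorted key C, head_sorted_eq_max? key]
  rw [hA, max?_eq_foldl]
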